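-- pv_equiv track=rewrite | github.com/jeffbrianho/python_110 | small_problems/easy5/easy5_3rd_try/question9.py | staggered_case
-- ===== SOURCE A (Python) =====
-- def staggered_case(string):
--
--     final_string = ''
--     upper = True
--
--     for char in string:
--         if char.isalpha():
--             if upper:
--                 final_string += char.upper()
--             else:
--                 final_string += char.lower()
--
--             upper = not upper
--         else:
--             final_string += char
--
--     return final_string
-- ===== SOURCE B (Python) =====
-- def staggered_case(string):
--     letters = [c for c in string if c.isalpha()]
--     cased = [c.upper() if i % 2 == 0 else c.lower() for i, c in enumerate(letters)]
--     it = iter(cased)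
--     return ''.join(next(it) if c.isalpha() else c for c in string)
-- ===== Notes on version B (the rewrite author's own statement) =====
-- stated objective: alternative
-- what changed: B replaces A's single stateful toggle sweep (boolean flipped in-place while appending) with two separate passes: first extract the letters and case them alternately by their letter index, then reweave the cased letters back into the original string around the non-letters.
import Mathlib
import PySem

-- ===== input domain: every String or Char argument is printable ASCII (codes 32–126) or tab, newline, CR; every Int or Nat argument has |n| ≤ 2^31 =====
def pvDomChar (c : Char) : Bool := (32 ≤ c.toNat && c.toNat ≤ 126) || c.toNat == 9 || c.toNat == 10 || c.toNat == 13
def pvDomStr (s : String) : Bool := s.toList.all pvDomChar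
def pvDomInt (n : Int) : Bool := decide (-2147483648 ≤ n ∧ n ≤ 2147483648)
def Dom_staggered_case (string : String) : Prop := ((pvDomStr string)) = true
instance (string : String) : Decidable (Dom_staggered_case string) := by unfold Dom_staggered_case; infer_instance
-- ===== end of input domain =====

-- B restates A's single stateful toggle sweep as two passes: extract-and-case the letters, then reweave.

-- ===== PORT A =====
-- literal port of A's loop: fold over the characters carrying (final_string, upper)
def staggered_case (string : String) : String :=
  let r := string.toList.foldl
    (fun (st : List Char × Bool) char =>
      if PySem.Chars.isalpha char then
        (if st.2 then (st.1 ++ [PySem.Chars.upperChar char], !st.2)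
         else (st.1 ++ [PySem.Chars.lowerChar char], !st.2))
      else (st.1 ++ [char], st.2))
    ([], true)
  String.mk r.1

-- ===== PORT B =====
-- reweaving pass: emit non-letters verbatim, pull the next cased letter for each letter
-- (the empty-queue alpha case is unreachable when the queue holds exactly the cased letters)
def pvWeave : List Char → List Char → List Char
  | [], _ => []
  | c :: cs, q =>
    if PySem.Chars.isalpha c then
      match q with
      | u :: q' => u :: pvWeave cs q'
      | [] => []
    else c :: pvWeave cs q

def staggered_case_alt (string : String) : String :=
  let letters := string.toList.filter PySem.Chars.isalpha
  let cased := (PySem.List.enumerate letters).map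
    (fun p => if p.1 % 2 == 0 then PySem.Chars.upperChar p.2 else PySem.Chars.lowerChar p.2)
  String.mk (pvWeave string.toList cased)

-- ===== PRECONDITION & SPEC =====
def Spec_staggered_case (string : String) (out : String) : Prop := out = staggered_case_alt string
instance (string : String) (out : String) : Decidable (Spec_staggered_case string out) := by unfold Spec_staggered_case; infer_instance

-- ===== CLAIM (what is proved, stated in full; the proofs are below) =====
def Claim_equal_staggered_case : Prop := ∀ (string : String), Dom_staggered_case string → Spec_staggered_case string (staggered_case string)

-- ===== LEMMAS AND PROOFS =====

-- direct recursion computing A's loop output from a starting parity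
def pvGo : Bool → List Char → List Char
  | _, [] => []
  | b, c :: cs =>
    if PySem.Chars.isalpha c then
      (if b then PySem.Chars.upperChar c else PySem.Chars.lowerChar c) :: pvGo (!b) cs
    else c :: pvGo b cs

-- alternate casing of a letter list from a starting parity
def pvAlt : Bool → List Char → List Char
  | _, [] => []
  | b, c :: cs => (if b then PySem.Chars.upperChar c else PySem.Chars.lowerChar c) :: pvAlt (!b) cs

theorem pvFoldl_eq_go (cs : List Char) (acc : List Char) (b : Bool) :
    (cs.foldl
      (fun (st : List Char × Bool) char =>
        if PySem.Chars.isalpha char then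
          (if st.2 then (st.1 ++ [PySem.Chars.upperChar char], !st.2)
           else (st.1 ++ [PySem.Chars.lowerChar char], !st.2))
        else (st.1 ++ [char], st.2))
      (acc, b)).1 = acc ++ pvGo b cs := by
  induction cs generalizing acc b with
  | nil => simp [pvGo]
  | cons c cs ih =>
    by_cases h : PySem.Chars.isalpha c = true
    · cases b <;> simp [pvGo, h, ih, List.append_assoc]
    · simp [pvGo, h, ih, List.append_assoc]

theorem pvEnum_map_eq_alt (ls : List Char) (s : Int) :
    (PySem.List.enumerate ls s).map
      (fun p => if p.1 % 2 == 0 then PySem.Chars.upperChar p.2 else PySem.Chars.lowerChar p.2)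
      = pvAlt (s % 2 == 0) ls := by
  induction ls generalizing s with
  | nil => simp [PySem.List.enumerate_nil, pvAlt]
  | cons c cs ih =>
    have hpar : (((s + 1) % 2 == 0) : Bool) = !((s % 2 == 0) : Bool) := by
      by_cases h : s % 2 = 0
      · have h1 : (s + 1) % 2 = 1 := by omega
        simp [h, h1]
      · have h1 : (s + 1) % 2 = 0 := by omega
        simp [h, h1]
    simp only [PySem.List.enumerate_cons, List.map_cons, ih, pvAlt, hpar]

theorem pvWeave_alt (cs : List Char) (b : Bool) :
    pvWeave cs (pvAlt b (cs.filter PySem.Chars.isalpha)) = pvGo b cs := by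
  induction cs generalizing b with
  | nil => simp [pvWeave, pvGo]
  | cons c cs ih =>
    by_cases h : PySem.Chars.isalpha c = true
    · simp [pvWeave, pvGo, h, pvAlt, ih]
    · simp [pvWeave, pvGo, h, ih]

-- ===== VERDICT (by name: the statement is the Claim_ definition above) =====
theorem staggered_case_spec : Claim_equal_staggered_case := by
  intro string _
  unfold Spec_staggered_case staggered_case staggered_case_alt
  simp only [pvFoldl_eq_go, List.nil_append, pvEnum_map_eq_alt]
  rw [show ((0 : Int) % 2 == 0) = true from rfl, pvWeave_alt]
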